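-- pv_equiv track=rewrite | github.com/shmyhero/waverider | strategies/macdspy.py | get_min_bar
-- ===== SOURCE A (Python) =====
-- def get_min_bar(macd_bar):
--     min_bar=0
--     for i in range(len(macd_bar)):
--         bar = macd_bar[-i-1]
--         if bar > 0:
--             break
--         elif bar < min_bar:
--             min_bar = bar
--     return min_bar
-- ===== SOURCE B (Python) =====
-- def get_min_bar(macd_bar):
--     # Single forward pass: a positive bar invalidates everything before it,
--     # so reset the accumulator to 0 there; otherwise fold in the minimum.
--     min_bar = 0
--     for bar in macd_bar:
--         min_bar = 0 if bar > 0 else min(min_bar, bar)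
--     return min_bar
-- ===== Notes on version B (the rewrite author's own statement) =====
-- stated objective: simpler
-- what changed: Replaces A's backward scan with early break by a single forward fold that resets the accumulator to 0 at each positive bar and otherwise folds in the minimum; it scans in the opposite direction, never breaks, and keeps a reset-on-positive invariant instead of a stop condition.
import Mathlib
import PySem

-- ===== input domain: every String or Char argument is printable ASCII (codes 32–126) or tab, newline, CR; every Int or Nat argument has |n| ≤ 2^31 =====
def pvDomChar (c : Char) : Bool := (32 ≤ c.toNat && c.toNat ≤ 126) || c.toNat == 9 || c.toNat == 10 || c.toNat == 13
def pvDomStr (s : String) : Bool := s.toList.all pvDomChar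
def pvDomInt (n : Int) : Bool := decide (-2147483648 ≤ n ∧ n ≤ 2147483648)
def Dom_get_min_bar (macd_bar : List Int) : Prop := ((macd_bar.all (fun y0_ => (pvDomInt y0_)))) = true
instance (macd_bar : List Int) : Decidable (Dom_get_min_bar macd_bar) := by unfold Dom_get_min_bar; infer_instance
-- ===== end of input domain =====

-- B replaces A's backward break-loop by a single forward fold that resets the accumulator to 0 at each positive bar; objective: simpler.


-- ===== PORT A =====
-- loop over i in range(len(macd_bar)), with 'break' as an early return of the accumulator
def get_min_barLoop (macd_bar : List Int) : List Int → Int → Int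
  | [], min_bar => min_bar
  | i :: rest, min_bar =>
    match PySem.List.pyGet? macd_bar (-i - 1) with
    | none => min_bar  -- unreachable: i ∈ range(len)
    | some bar =>
      if bar > 0 then min_bar
      else get_min_barLoop macd_bar rest (if bar < min_bar then bar else min_bar)

def get_min_bar (macd_bar : List Int) : Int :=
  get_min_barLoop macd_bar (PySem.List.pyRange 0 macd_bar.length 1) 0

-- ===== PORT B =====
-- forward fold: reset to 0 on a positive bar, otherwise min
def get_min_bar_alt (macd_bar : List Int) : Int :=
  macd_bar.foldl (fun min_bar bar => if bar > 0 then 0 else min min_bar bar) 0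

-- ===== PRECONDITION & SPEC =====
def Spec_get_min_bar (macd_bar : List Int) (out : Int) : Prop := out = get_min_bar_alt macd_bar
instance (macd_bar : List Int) (out : Int) : Decidable (Spec_get_min_bar macd_bar out) := by unfold Spec_get_min_bar; infer_instance

-- ===== CLAIM (what is proved, stated in full; the proofs are below) =====
def Claim_equal_get_min_bar : Prop := ∀ (macd_bar : List Int), Dom_get_min_bar macd_bar → Spec_get_min_bar macd_bar (get_min_bar macd_bar)

-- ===== LEMMAS AND PROOFS =====

-- A's loop, re-expressed as structural recursion over the reversed list
def fA : List Int → Int → Int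
  | [], m => m
  | b :: t, m => if b > 0 then m else fA t (if b < m then b else m)

lemma loop_eq_fA (l : List Int) : ∀ (k : Nat) (m : Int),
    get_min_barLoop l (PySem.List.pyRange k l.length 1) m = fA (l.reverse.drop k) m := by
  intro k
  induction hlen : l.length - k using Nat.strong_induction_on generalizing k with
  | _ n ih =>
  intro m
  by_cases hk : k < l.length
  · have hkr : k < l.reverse.length := by simpa using hk
    rw [PySem.List.pyRange_one_cons (by exact_mod_cast hk)]
    have hrev : l.reverse.drop k = l.reverse[k]'hkr :: l.reverse.drop (k+1) :=
      (List.getElem_cons_drop hkr).symm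
    have hget : PySem.List.pyGet? l (-(k:Int) - 1) = some (l.reverse[k]'hkr) := by
      have h1 : (-(k:Int) - 1) = -(((k+1 : Nat)):Int) := by push_cast; ring
      rw [h1, PySem.List.pyGet?_neg_natCast l (k+1) (by omega) (by omega)]
      have h2 : l[l.length - (k+1)]? = some (l[l.length - (k+1)]'(by omega)) :=
        List.getElem?_eq_getElem (by omega)
      rw [h2]
      congr 1
      rw [List.getElem_reverse]
      congr 1
      omega
    have hcast : ((k:Int) + 1) = ((k+1 : Nat) : Int) := by push_cast; ring
    rw [hrev]
    simp only [get_min_barLoop, hget, fA]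
    split
    · rfl
    · rw [hcast, ih (l.length - (k+1)) (by omega) (k+1) rfl]
  · have h1 : PySem.List.pyRange (k:Int) (l.length:Int) 1 = [] := by
      simp [PySem.List.pyRange]; omega
    have h2 : l.reverse.drop k = [] := by
      rw [List.drop_eq_nil_iff]
      simpa using Nat.le_of_not_lt hk
    rw [h1, h2]; rfl

lemma fA_nonpos (rs : List Int) : ∀ m : Int, m ≤ 0 → fA rs m ≤ 0 := by
  induction rs with
  | nil => intro m hm; simpa [fA] using hm
  | cons b t ih =>
    intro m hm
    simp only [fA]
    split
    · exact hm
    · exact ih _ (by split <;> omega)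

lemma fA_min (rs : List Int) : ∀ m : Int, m ≤ 0 → fA rs m = min m (fA rs 0) := by
  induction rs with
  | nil => intro m hm; simp [fA]; omega
  | cons b t ih =>
    intro m hm
    by_cases hb : b > 0
    · simp [fA, hb]; omega
    · have h1 : fA (b :: t) m = fA t (min m b) := by
        simp only [fA, if_neg hb]; congr 1; omega
      have h2 : fA (b :: t) 0 = fA t (min 0 b) := by
        simp only [fA, if_neg hb]; congr 1; omega
      rw [h1, h2, ih (min m b) (by omega), ih (min 0 b) (by omega)]
      have := fA_nonpos t 0 le_rfl
      omega

lemma fA_reverse_eq_foldl (l : List Int) :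
    fA l.reverse 0 = l.foldl (fun min_bar bar => if bar > 0 then 0 else min min_bar bar) 0 := by
  induction l using List.reverseRecOn with
  | nil => rfl
  | append_singleton t b ih =>
    rw [List.foldl_append, List.foldl_cons, List.foldl_nil, ← ih, List.reverse_append]
    simp only [List.reverse_cons, List.reverse_nil, List.nil_append, List.cons_append]
    show fA (b :: t.reverse) 0 = if b > 0 then 0 else min (fA t.reverse 0) b
    by_cases hb : b > 0
    · simp [fA, hb]
    · simp only [fA, if_neg hb]
      rw [fA_min t.reverse (if b < 0 then b else 0) (by split <;> omega)]
      have := fA_nonpos t.reverse 0 le_rfl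
      split <;> omega

-- ===== VERDICT (by name: the statement is the Claim_ definition above) =====
theorem get_min_bar_spec : Claim_equal_get_min_bar := by
  intro l _
  show get_min_bar l = get_min_bar_alt l
  have h1 : get_min_bar l = fA l.reverse 0 := by
    have h := loop_eq_fA l 0 0
    simpa [get_min_bar] using h
  rw [h1, fA_reverse_eq_foldl]
  rfl
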